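-- pv_equiv track=rewrite | github.com/NVIDIA-NeMo/RL | nemo_rl/data/module_hf.py | detect_dataset_format
-- ===== SOURCE A (Python) =====
-- COLUMN_NAME_PATTERNS: dict[str, list[str]] = {
--     "prompt": ["prompt", "question", "instruction", "problem", "input", "query", "text"],
--     "response": ["response", "answer", "output", "completion", "generated_solution", "solution"],
--     "context": ["context", "input_context", "system"],
--     "chosen": ["chosen", "chosen_response", "preferred"],
--     "rejected": ["rejected", "rejected_response", "dispreferred"],
--     "messages": ["messages", "conversation", "chat"],
-- }
--
-- def detect_dataset_format(columns: list[str]) -> str: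
--     """Detect the dataset format based on column names.
--
--     Args:
--         columns: List of column names in the dataset.
--
--     Returns:
--         One of: 'chat', 'completion', 'preference', 'text', 'unknown'
--     """
--     col_set = set(columns)
--
--     # Check for chat/conversation format
--     if any(c in col_set for c in COLUMN_NAME_PATTERNS["messages"]):
--         return "chat"
--
--     # Check for preference format (DPO)
--     has_chosen = any(c in col_set for c in COLUMN_NAME_PATTERNS["chosen"])
--     has_rejected = any(c in col_set for c in COLUMN_NAME_PATTERNS["rejected"])
--     if has_chosen and has_rejected:
--         return "preference"
--
--     # Check for instruction/completion format
--     has_prompt = any(c in col_set for c in COLUMN_NAME_PATTERNS["prompt"])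
--     has_response = any(c in col_set for c in COLUMN_NAME_PATTERNS["response"])
--     if has_prompt and has_response:
--         return "completion"
--
--     # Check for raw text format
--     if "text" in col_set or "content" in col_set:
--         return "text"
--
--     return "unknown"
-- ===== SOURCE B (Python) =====
-- # Reverse index over COLUMN_NAME_PATTERNS + one pass over the columns.
-- _REVERSE = {
--     name: category
--     for category, names in {
--         "prompt": ["prompt", "question", "instruction", "problem", "input", "query", "text"],
--         "response": ["response", "answer", "output", "completion", "generated_solution", "solution"],
--         "context": ["context", "input_context", "system"],
--         "chosen": ["chosen", "chosen_response", "preferred"],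
--         "rejected": ["rejected", "rejected_response", "dispreferred"],
--         "messages": ["messages", "conversation", "chat"],
--     }.items()
--     for name in names
-- }
--
--
-- def detect_dataset_format(columns: list[str]) -> str:
--     present = set()
--     raw_text = False
--     for c in columns:
--         cat = _REVERSE.get(c)
--         if cat is not None:
--             present.add(cat)
--         if c == "text" or c == "content":
--             raw_text = True
--     if "messages" in present:
--         return "chat"
--     if "chosen" in present and "rejected" in present:
--         return "preference"
--     if "prompt" in present and "response" in present:
--         return "completion"
--     if raw_text:
--         return "text"
--     return "unknown"
-- ===== Notes on version B (the rewrite author's own statement) =====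
-- stated objective: alternative
-- what changed: Replaces the set-of-columns plus per-category any()-scans over the pattern lists by a precomputed reverse index (column name -> category) and a single pass over the input columns that collects the set of present categories and a raw-text flag, then reads the same priority cascade off that set.
import Mathlib
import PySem

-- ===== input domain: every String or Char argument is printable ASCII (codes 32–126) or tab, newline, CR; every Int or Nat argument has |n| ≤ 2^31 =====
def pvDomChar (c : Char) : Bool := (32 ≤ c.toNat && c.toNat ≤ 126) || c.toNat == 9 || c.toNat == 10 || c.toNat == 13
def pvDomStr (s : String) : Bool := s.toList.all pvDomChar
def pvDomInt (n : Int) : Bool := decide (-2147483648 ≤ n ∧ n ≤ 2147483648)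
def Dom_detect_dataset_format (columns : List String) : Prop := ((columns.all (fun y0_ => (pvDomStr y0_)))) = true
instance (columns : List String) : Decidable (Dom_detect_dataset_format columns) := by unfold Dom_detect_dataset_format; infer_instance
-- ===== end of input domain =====

-- B replaces the column-set plus per-category pattern scans by a reverse index (name -> category)
-- and a single pass over the columns; alternative decomposition, same cost.


-- ===== PORT A =====
-- COLUMN_NAME_PATTERNS, one list per category
def pvPatPrompt : List String := ["prompt", "question", "instruction", "problem", "input", "query", "text"]
def pvPatResponse : List String := ["response", "answer", "output", "completion", "generated_solution", "solution"]
def pvPatChosen : List String := ["chosen", "chosen_response", "preferred"]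
def pvPatRejected : List String := ["rejected", "rejected_response", "dispreferred"]
def pvPatMessages : List String := ["messages", "conversation", "chat"]

def detect_dataset_format (columns : List String) : String :=
  let col_set : PySem.Set String := PySem.Set.ofList columns
  if pvPatMessages.any (fun c => PySem.Set.contains col_set c) then "chat"
  else
    let has_chosen := pvPatChosen.any (fun c => PySem.Set.contains col_set c)
    let has_rejected := pvPatRejected.any (fun c => PySem.Set.contains col_set c)
    if has_chosen && has_rejected then "preference"
    else
      let has_prompt := pvPatPrompt.any (fun c => PySem.Set.contains col_set c)
      let has_response := pvPatResponse.any (fun c => PySem.Set.contains col_set c)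
      if has_prompt && has_response then "completion"
      else if PySem.Set.contains col_set "text" || PySem.Set.contains col_set "content" then "text"
      else "unknown"

-- ===== PORT B =====
-- _REVERSE: column name -> category (dict literal, insertion order; keys are unique)
def pvReverse : PySem.Dict String String := PySem.Dict.mk
  [("prompt", "prompt"), ("question", "prompt"), ("instruction", "prompt"), ("problem", "prompt"),
   ("input", "prompt"), ("query", "prompt"), ("text", "prompt"),
   ("response", "response"), ("answer", "response"), ("output", "response"), ("completion", "response"),
   ("generated_solution", "response"), ("solution", "response"),
   ("context", "context"), ("input_context", "context"), ("system", "context"),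
   ("chosen", "chosen"), ("chosen_response", "chosen"), ("preferred", "chosen"),
   ("rejected", "rejected"), ("rejected_response", "rejected"), ("dispreferred", "rejected"),
   ("messages", "messages"), ("conversation", "messages"), ("chat", "messages")]

-- loop body of B's single pass: update (present, raw_text) with one column
def pvStep (st : PySem.Set String × Bool) (c : String) : PySem.Set String × Bool :=
  let present :=
    match pvReverse.get? c with
    | some cat => PySem.Set.add st.1 cat
    | none => st.1
  (present, st.2 || (c == "text" || c == "content"))

def detect_dataset_format_alt (columns : List String) : String :=
  let st := columns.foldl pvStep (PySem.Set.empty, false)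
  if PySem.Set.contains st.1 "messages" then "chat"
  else if PySem.Set.contains st.1 "chosen" && PySem.Set.contains st.1 "rejected" then "preference"
  else if PySem.Set.contains st.1 "prompt" && PySem.Set.contains st.1 "response" then "completion"
  else if st.2 then "text"
  else "unknown"

-- ===== PRECONDITION & SPEC =====
def Spec_detect_dataset_format (columns : List String) (out : String) : Prop := out = detect_dataset_format_alt columns
instance (columns : List String) (out : String) : Decidable (Spec_detect_dataset_format columns out) := by unfold Spec_detect_dataset_format; infer_instance

-- ===== CLAIM (what is proved, stated in full; the proofs are below) =====
def Claim_equal_detect_dataset_format : Prop := ∀ (columns : List String), Dom_detect_dataset_format columns → Spec_detect_dataset_format columns (detect_dataset_format columns)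

-- ===== LEMMAS AND PROOFS =====

-- the raw_text flag of B's fold is 'some column is "text" or "content"'
theorem pv_fold_snd (columns : List String) (st : PySem.Set String × Bool) :
    (columns.foldl pvStep st).2 = (st.2 || columns.any (fun c => c == "text" || c == "content")) := by
  induction columns generalizing st with
  | nil => simp
  | cons c cs ih => simp [pvStep, ih, Bool.or_assoc]

-- membership in the present-category set of B's fold
theorem pv_fold_fst_mem (k : String) (columns : List String) (st : PySem.Set String × Bool) :
    k ∈ (columns.foldl pvStep st).1 ↔ k ∈ st.1 ∨ ∃ c ∈ columns, pvReverse.get? c = some k := by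
  induction columns generalizing st with
  | nil => simp
  | cons c cs ih =>
    simp only [List.foldl_cons, ih, pvStep]
    cases h : pvReverse.get? c with
    | none => simp [h]
    | some cat =>
      simp only [PySem.Set.mem_add, List.mem_cons]
      constructor
      · rintro ((hs | rfl) | ⟨d, hd, hg⟩)
        · exact Or.inl hs
        · exact Or.inr ⟨c, Or.inl rfl, h⟩
        · exact Or.inr ⟨d, Or.inr hd, hg⟩
      · rintro (hs | ⟨d, rfl | hd, hg⟩)
        · exact Or.inl (Or.inl hs)
        · exact Or.inl (Or.inr (Option.some_injective _ ((h.symm.trans hg))).symm)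
        · exact Or.inr ⟨d, hd, hg⟩

-- first-match lookup in a literal dict with distinct keys is plain membership
theorem pv_getmk (l : List (String × String)) (hnd : (l.map Prod.fst).Nodup) (c k : String) :
    (PySem.Dict.mk l).get? c = some k ↔ (c, k) ∈ l := by
  induction l with
  | nil => simp [PySem.Dict.get?]
  | cons p t ih =>
    obtain ⟨a, b⟩ := p
    simp only [List.map_cons, List.nodup_cons, List.mem_map] at hnd
    rw [PySem.Dict.get?_mk_cons]
    by_cases hac : a = c
    · subst hac
      simp only [BEq.rfl, if_true, Option.some.injEq, List.mem_cons, Prod.mk.injEq, true_and]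
      constructor
      · intro h; exact Or.inl h.symm
      · rintro (rfl | hm)
        · rfl
        · exact absurd ⟨(a, k), hm, rfl⟩ hnd.1
    · have hb : (a == c) = false := by simp [hac]
      simp only [hb, Bool.false_eq_true, if_false, List.mem_cons, Prod.mk.injEq, ih hnd.2]
      constructor
      · exact Or.inr
      · rintro (⟨rfl, -⟩ | hm)
        · exact absurd rfl hac
        · exact hm

-- the reverse index hits exactly the pattern lists
theorem pv_rev_messages (c : String) : pvReverse.get? c = some "messages" ↔ c ∈ pvPatMessages := by
  rw [pvReverse, pv_getmk _ (by decide)]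
  simp [pvPatMessages, Prod.ext_iff]
theorem pv_rev_chosen (c : String) : pvReverse.get? c = some "chosen" ↔ c ∈ pvPatChosen := by
  rw [pvReverse, pv_getmk _ (by decide)]
  simp [pvPatChosen, Prod.ext_iff]
theorem pv_rev_rejected (c : String) : pvReverse.get? c = some "rejected" ↔ c ∈ pvPatRejected := by
  rw [pvReverse, pv_getmk _ (by decide)]
  simp [pvPatRejected, Prod.ext_iff]
theorem pv_rev_prompt (c : String) : pvReverse.get? c = some "prompt" ↔ c ∈ pvPatPrompt := by
  rw [pvReverse, pv_getmk _ (by decide)]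
  simp [pvPatPrompt, Prod.ext_iff]
theorem pv_rev_response (c : String) : pvReverse.get? c = some "response" ↔ c ∈ pvPatResponse := by
  rw [pvReverse, pv_getmk _ (by decide)]
  simp [pvPatResponse, Prod.ext_iff]

-- each category test of B equals the corresponding any()-scan of A
theorem pv_cond_eq (pats : List String) (k : String)
    (hk : ∀ c, pvReverse.get? c = some k ↔ c ∈ pats) (columns : List String) :
    PySem.Set.contains (columns.foldl pvStep (PySem.Set.empty, false)).1 k
      = pats.any (fun p => PySem.Set.contains (PySem.Set.ofList columns) p) := by
  rw [Bool.eq_iff_iff]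
  simp only [PySem.Set.contains_iff, pv_fold_fst_mem, List.any_eq_true, PySem.Set.mem_ofList, hk]
  constructor
  · rintro (h | ⟨c, hc, hp⟩)
    · simp [PySem.Set.empty] at h
    · exact ⟨c, hp, hc⟩
  · rintro ⟨p, hp, hc⟩
    exact Or.inr ⟨p, hc, hp⟩

-- the raw_text flag equals A's literal "text"/"content" test
theorem pv_raw_eq (columns : List String) :
    (columns.foldl pvStep (PySem.Set.empty, false)).2
      = (PySem.Set.contains (PySem.Set.ofList columns) "text"
          || PySem.Set.contains (PySem.Set.ofList columns) "content") := by
  rw [pv_fold_snd, Bool.eq_iff_iff]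
  simp only [Bool.false_or, List.any_eq_true, Bool.or_eq_true, beq_iff_eq,
    PySem.Set.contains_iff, PySem.Set.mem_ofList]
  constructor
  · rintro ⟨c, hc, rfl | rfl⟩
    · exact Or.inl hc
    · exact Or.inr hc
  · rintro (h | h)
    · exact ⟨"text", h, Or.inl rfl⟩
    · exact ⟨"content", h, Or.inr rfl⟩

-- ===== VERDICT (by name: the statement is the Claim_ definition above) =====
theorem detect_dataset_format_spec : Claim_equal_detect_dataset_format := by
  intro columns _
  unfold Spec_detect_dataset_format
  simp only [detect_dataset_format, detect_dataset_format_alt,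
    pv_cond_eq pvPatMessages "messages" pv_rev_messages,
    pv_cond_eq pvPatChosen "chosen" pv_rev_chosen,
    pv_cond_eq pvPatRejected "rejected" pv_rev_rejected,
    pv_cond_eq pvPatPrompt "prompt" pv_rev_prompt,
    pv_cond_eq pvPatResponse "response" pv_rev_response,
    pv_raw_eq]
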